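-- pv_equiv track=rewrite | github.com/danielorlando97/job-market-stats-publish-streamlit | pages/1_📊_GetOnBoard.py | f
-- ===== SOURCE A (Python) =====
-- def f(countries):
--     if not isinstance(countries, str) or countries == '':
--         return ['Not Say']
--
--     return [
--         c.strip()
--         for countries_or_tuple in countries.split(',')
--         for c in countries_or_tuple.split(' or ')
--     ]
-- ===== SOURCE B (Python) =====
-- def f(countries):
--     if not isinstance(countries, str) or countries == '':
--         return ['Not Say']
--     # single left-to-right scan, splitting on ',' or ' or ' in one pass
--     parts = []
--     cur = []
--     i = 0
--     n = len(countries)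
--     while i < n:
--         if countries[i] == ',':
--             parts.append(''.join(cur))
--             cur = []
--             i += 1
--         elif countries.startswith(' or ', i):
--             parts.append(''.join(cur))
--             cur = []
--             i += 4
--         else:
--             cur.append(countries[i])
--             i += 1
--     parts.append(''.join(cur))
--     return [p.strip() for p in parts]
-- ===== Notes on version B (the rewrite author's own statement) =====
-- stated objective: alternative
-- what changed: Replaces the nested two-level split (split on ',' then each piece on ' or ') with a single left-to-right scan over the characters that cuts a fragment at either separator in one pass.
import Mathlib
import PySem

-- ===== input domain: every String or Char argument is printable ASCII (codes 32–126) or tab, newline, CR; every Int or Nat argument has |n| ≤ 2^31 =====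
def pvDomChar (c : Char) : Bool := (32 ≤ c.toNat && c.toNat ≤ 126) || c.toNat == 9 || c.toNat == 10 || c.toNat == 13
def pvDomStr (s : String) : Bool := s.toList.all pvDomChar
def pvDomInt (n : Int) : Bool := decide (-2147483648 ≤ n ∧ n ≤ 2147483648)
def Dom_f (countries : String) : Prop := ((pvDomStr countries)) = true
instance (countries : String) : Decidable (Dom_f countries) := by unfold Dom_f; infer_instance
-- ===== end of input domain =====

-- B replaces A's nested two-level split with one left-to-right scan; objective: alternative (same cost, flat single pass).

-- ===== PORT A =====
-- nested comprehension: split on ',', each piece split on ' or ', strip each fragment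
def f (countries : String) : List String :=
  if countries = "" then ["Not Say"]
  else
    ((PySem.Chars.splitOn countries.toList [',']).flatMap
        (fun piece => PySem.Chars.splitOn piece [' ', 'o', 'r', ' '])).map
      (fun c => PySem.Str.strip (String.ofList c))

-- ===== PORT B =====
-- the single scan of Source B: cur is the fragment being built (in reverse), cut at ',' or ' or '
def scanB : List Char → List Char → List (List Char)
  | [], cur => [cur.reverse]
  | c :: t, cur =>
    if c = ',' then cur.reverse :: scanB t []
    else if ([' ', 'o', 'r', ' '] : List Char).isPrefixOf (c :: t) then
      cur.reverse :: scanB (t.drop 3) []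
    else scanB t (c :: cur)
termination_by l _ => l.length
decreasing_by all_goals simp

def f_alt (countries : String) : List String :=
  if countries = "" then ["Not Say"]
  else (scanB countries.toList []).map (fun p => PySem.Str.strip (String.ofList p))

-- ===== PRECONDITION & SPEC =====
def Spec_f (countries : String) (out : List String) : Prop := out = f_alt countries
instance (countries : String) (out : List String) : Decidable (Spec_f countries out) := by unfold Spec_f; infer_instance

-- ===== CLAIM (what is proved, stated in full; the proofs are below) =====
def Claim_equal_f : Prop := ∀ (countries : String), Dom_f countries → Spec_f countries (f countries)

-- ===== LEMMAS AND PROOFS =====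

/-- prepend a char to the first piece -/
def consHead (c : Char) : List (List Char) → List (List Char)
  | [] => [[c]]
  | h :: hs => (c :: h) :: hs

/-- apply a function to the first piece -/
def modHead (g : List Char → List Char) : List (List Char) → List (List Char)
  | [] => []
  | h :: hs => g h :: hs

/-- fuel-free structural version of Python's str.split(sep) for nonempty sep -/
def splitRec (sep : List Char) : List Char → List (List Char)
  | [] => [[]]
  | c :: t =>
    if sep.isPrefixOf (c :: t) then [] :: splitRec sep (t.drop (sep.length - 1))
    else consHead c (splitRec sep t)
termination_by l => l.length
decreasing_by all_goals simp

theorem splitRec_nil (sep : List Char) : splitRec sep [] = [[]] := by rw [splitRec]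

theorem splitRec_ne_nil (sep l : List Char) : splitRec sep l ≠ [] := by
  cases l with
  | nil => simp [splitRec_nil]
  | cons c t =>
    rw [splitRec]
    split
    · simp
    · rcases h : splitRec sep t with _ | ⟨h', hs⟩ <;> simp [consHead]

theorem modHead_cons (g : List Char → List Char) (h : List Char)
    (hs : List (List Char)) : modHead g (h :: hs) = g h :: hs := rfl

theorem modHead_id (L : List (List Char)) : modHead (fun x => x) L = L := by
  cases L <;> simp [modHead]

theorem modHead_nil_rev (L : List (List Char)) :
    modHead (fun x => ([] : List Char).reverse ++ x) L = L := by
  cases L <;> simp [modHead]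

theorem modHead_consHead (cur : List Char) (c : Char) (L : List (List Char)) (h : L ≠ []) :
    modHead (fun x => cur.reverse ++ x) (consHead c L)
      = modHead (fun x => (c :: cur).reverse ++ x) L := by
  cases L with
  | nil => exact absurd rfl h
  | cons hd tl => simp [consHead, modHead]

theorem consHead_append (c : Char) (L M : List (List Char)) (h : L ≠ []) :
    consHead c L ++ M = consHead c (L ++ M) := by
  cases L with
  | nil => exact absurd rfl h
  | cons hd tl => simp [consHead]

theorem splitOn_go_eq (sep : List Char) (hsep : sep ≠ []) :
    ∀ (fuel : Nat) (l cur : List Char) (acc : List (List Char)), l.length < fuel →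
      PySem.Chars.splitOn.go sep fuel l cur acc
        = acc.reverse ++ modHead (fun x => cur.reverse ++ x) (splitRec sep l) := by
  intro fuel
  induction fuel with
  | zero => intro l cur acc h; omega
  | succ n ih =>
    intro l cur acc h
    cases l with
    | nil =>
      rw [PySem.Chars.splitOn.go.eq_2 sep (n+1) cur acc (by omega)]
      simp [splitRec_nil, modHead]
    | cons c t =>
      rw [PySem.Chars.splitOn.go.eq_3]
      by_cases hp : sep.isPrefixOf (c :: t) = true
      · rw [if_pos hp]
        have hd : (c :: t).drop sep.length = t.drop (sep.length - 1) := by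
          cases sep with
          | nil => exact absurd rfl hsep
          | cons s ss => simp
        rw [hd, ih _ _ _ (by simp at h ⊢; omega)]
        rw [splitRec, if_pos hp, modHead_nil_rev, modHead_cons]
        simp
      · rw [if_neg hp, ih _ _ _ (by simp at h ⊢; omega)]
        rw [splitRec, if_neg hp,
          modHead_consHead cur c _ (splitRec_ne_nil sep t)]

theorem splitOn_eq (s sep : List Char) (hsep : sep ≠ []) :
    PySem.Chars.splitOn s sep = splitRec sep s := by
  rw [PySem.Chars.splitOn, splitOn_go_eq sep hsep _ _ _ _ (by omega)]
  simp [modHead_id]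

theorem splitRec_comma_cons (c : Char) (t : List Char) :
    splitRec [','] (c :: t)
      = if c = ',' then [] :: splitRec [','] t else consHead c (splitRec [','] t) := by
  rw [splitRec]
  by_cases hc : c = ',' <;> simp [List.isPrefixOf, hc]
  intro h; exact absurd h.symm hc

-- the comma-level split, described by takeWhile/dropWhile
def tail1 (l : List Char) : List (List Char) :=
  match l.dropWhile (fun c => c != ',') with
  | [] => []
  | _ :: r => splitRec [','] r

theorem S1_struct : ∀ l : List Char,
    splitRec [','] l = l.takeWhile (fun c => c != ',') :: tail1 l := by
  intro l
  induction l with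
  | nil => simp [splitRec_nil, tail1]
  | cons c t ih =>
    rw [splitRec_comma_cons]
    by_cases hc : c = ','
    · subst hc
      simp [tail1, List.takeWhile, List.dropWhile]
    · have hct : (c != ',') = true := by simp [hc]
      rw [if_neg hc, ih]
      simp [consHead, List.takeWhile, List.dropWhile, hct, tail1]

def orSep : List Char := [' ', 'o', 'r', ' ']

theorem orPrefix_iff (l : List Char) :
    orSep.isPrefixOf l = true ↔ ∃ r, l = ' ' :: 'o' :: 'r' :: ' ' :: r := by
  rw [List.isPrefixOf_iff_prefix]
  constructor
  · rintro ⟨r, hr⟩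
    exact ⟨r, by simpa [orSep] using hr.symm⟩
  · rintro ⟨r, rfl⟩
    exact ⟨r, rfl⟩

def flatF (l : List Char) : List (List Char) :=
  (splitRec [','] l).flatMap (fun piece => splitRec orSep piece)

theorem flatF_ne_nil (l : List Char) : flatF l ≠ [] := by
  rw [flatF, S1_struct]
  simp only [List.flatMap_cons]
  intro h
  rcases List.append_eq_nil_iff.mp h with ⟨h1, _⟩
  exact splitRec_ne_nil _ _ h1

theorem flatF_nil : flatF [] = [[]] := by
  simp [flatF, splitRec_nil]

theorem flatF_comma (t : List Char) : flatF (',' :: t) = [] :: flatF t := by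
  rw [flatF, splitRec_comma_cons, if_pos rfl]
  simp only [List.flatMap_cons]
  rw [splitRec_nil]
  rfl

theorem flatF_or (t : List Char) (h : orSep.isPrefixOf (' ' :: t) = true) :
    flatF (' ' :: t) = [] :: flatF (t.drop 3) := by
  rcases (orPrefix_iff _).mp h with ⟨r, hr⟩
  have ht : t = 'o' :: 'r' :: ' ' :: r := by injection hr
  subst ht
  simp only [List.drop_succ_cons, List.drop_zero]
  rw [flatF, S1_struct, flatF, S1_struct]
  have htw : (' ' :: 'o' :: 'r' :: ' ' :: r).takeWhile (fun c => c != ',')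
      = ' ' :: 'o' :: 'r' :: ' ' :: r.takeWhile (fun c => c != ',') := by
    simp [List.takeWhile]
  have hdw : (' ' :: 'o' :: 'r' :: ' ' :: r).dropWhile (fun c => c != ',')
      = r.dropWhile (fun c => c != ',') := by
    simp [List.dropWhile]
  rw [htw]
  simp only [List.flatMap_cons]
  rw [splitRec]
  have hp : orSep.isPrefixOf
      (' ' :: 'o' :: 'r' :: ' ' :: r.takeWhile (fun c => c != ',')) = true := by
    rw [orPrefix_iff]; exact ⟨_, rfl⟩
  rw [if_pos hp]
  have htail : tail1 (' ' :: 'o' :: 'r' :: ' ' :: r) = tail1 r := by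
    rw [tail1, tail1, hdw]
  rw [htail]
  simp [orSep]

theorem flatF_other (c : Char) (t : List Char) (hc : c ≠ ',')
    (ho : orSep.isPrefixOf (c :: t) = false) :
    flatF (c :: t) = consHead c (flatF t) := by
  rw [flatF, S1_struct, flatF, S1_struct]
  have hct : (c != ',') = true := by simp [hc]
  have htw : (c :: t).takeWhile (fun c => c != ',')
      = c :: t.takeWhile (fun c => c != ',') := by
    simp [List.takeWhile, hct]
  have htail : tail1 (c :: t) = tail1 t := by
    rw [tail1, tail1]
    simp [List.dropWhile, hct]
  rw [htw, htail]
  have hnp : orSep.isPrefixOf (c :: t.takeWhile (fun c => c != ',')) = false := by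
    by_contra hcon
    rw [Bool.not_eq_false, orPrefix_iff] at hcon
    rcases hcon with ⟨r, hr⟩
    have hc' : c = ' ' := by injection hr
    have htw' : t.takeWhile (fun c => c != ',') = 'o' :: 'r' :: ' ' :: r := by
      injection hr
    have hpre : ('o' :: 'r' :: ' ' :: r) <+: t := htw' ▸ List.takeWhile_prefix _
    rcases hpre with ⟨u, hu⟩
    subst hc'
    rw [← hu] at ho
    rw [(orPrefix_iff _).mpr ⟨r ++ u, by simp⟩] at ho
    exact Bool.true_eq_false.mp ho
  simp only [List.flatMap_cons]
  rw [splitRec, hnp]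
  simp only [Bool.false_eq_true, if_false]
  rw [consHead_append _ _ _ (splitRec_ne_nil _ _)]

theorem scanB_eq : ∀ (l cur : List Char),
    scanB l cur = modHead (fun x => cur.reverse ++ x) (flatF l) := by
  intro l cur
  induction l, cur using scanB.induct with
  | case1 cur => simp [scanB, flatF_nil, modHead]
  | case2 t cur ih =>
    rw [scanB]
    rw [if_pos rfl, ih, flatF_comma, modHead_nil_rev, modHead_cons]
    simp
  | case3 c t cur hc hp ih =>
    have hp' : orSep.isPrefixOf (c :: t) = true := hp
    have hc' : c = ' ' := by
      rcases (orPrefix_iff (c :: t)).mp hp' with ⟨r, hr⟩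
      injection hr
    subst hc'
    rw [scanB, if_neg hc, if_pos hp, ih, flatF_or t hp', modHead_nil_rev, modHead_cons]
    simp
  | case4 c t cur hc hp ih =>
    have hp' : orSep.isPrefixOf (c :: t) = false := by
      simp only [Bool.not_eq_true] at hp; exact hp
    rw [scanB, if_neg hc, if_neg hp, ih,
      flatF_other c t hc hp',
      modHead_consHead cur c _ (flatF_ne_nil t)]

-- ===== VERDICT (by name: the statement is the Claim_ definition above) =====
theorem f_spec : Claim_equal_f := by
  intro countries _
  unfold Spec_f f f_alt
  by_cases h : countries = ""
  · simp [h]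
  · rw [if_neg h, if_neg h, scanB_eq, modHead_nil_rev, flatF]
    rw [splitOn_eq _ _ (by simp)]
    congr 1
    simp only [orSep]
    exact congrArg (fun g => List.flatMap g (splitRec [','] countries.toList))
      (funext fun piece => splitOn_eq piece _ (by simp))
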